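-- pv_equiv track=rewrite | github.com/designed7000/Data_extractor | src/messing/step4.py | extract_with_simple_ai
-- ===== SOURCE A (Python) =====
-- def extract_with_simple_ai(text):
--     """Simple AI-like extraction using keyword context"""
--
--     # This simulates AI by looking at context around keywords
--     # Later we'll replace this with real AI
--
--     lines = text.lower().split('\n')
--     ai_extracted = {}
--
--     # Look for industry information
--     industry_keywords = ['software', 'technology', 'web development', 'mobile apps', 'consulting']
--     for line in lines:
--         for keyword in industry_keywords:
--             if keyword in line:
--                 ai_extracted['industry'] = keyword.title()
--                 break
--         if 'industry' in ai_extracted: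
--             break
--
--     # Look for company description
--     description_lines = []
--     for line in lines:
--         if any(word in line for word in ['we are', 'we specialize', 'our team']):
--             description_lines.append(line.strip())
--
--     if description_lines:
--         ai_extracted['description'] = '. '.join(description_lines)
--
--     # Look for contact information context
--     for line in lines:
--         if 'contact' in line and '@' in line:
--             ai_extracted['has_contact_info'] = True
--             break
--
--     return ai_extracted
-- ===== SOURCE B (Python) =====
-- def extract_with_simple_ai(text):
--     """Single-pass keyword extraction: one loop over the lines with flags."""
--     industry = None
--     description_lines = []
--     has_contact = False
--     industry_keywords = ['software', 'technology', 'web development', 'mobile apps', 'consulting']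
--     for line in text.lower().split('\n'):
--         if industry is None:
--             for keyword in industry_keywords:
--                 if keyword in line:
--                     industry = keyword.title()
--                     break
--         if any(word in line for word in ('we are', 'we specialize', 'our team')):
--             description_lines.append(line.strip())
--         if not has_contact and 'contact' in line and '@' in line:
--             has_contact = True
--     result = {}
--     if industry is not None:
--         result['industry'] = industry
--     if description_lines:
--         result['description'] = '. '.join(description_lines)
--     if has_contact:
--         result['has_contact_info'] = True
--     return result
-- ===== Notes on version B (the rewrite author's own statement) =====
-- stated objective: alternative
-- what changed: A's three separate sequential loops over the lines (industry with break, description accumulator, contact with break) are fused into one single pass carrying a flag-style state, and the result mapping is assembled at the end instead of via dict mutation during the passes.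
import Mathlib
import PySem

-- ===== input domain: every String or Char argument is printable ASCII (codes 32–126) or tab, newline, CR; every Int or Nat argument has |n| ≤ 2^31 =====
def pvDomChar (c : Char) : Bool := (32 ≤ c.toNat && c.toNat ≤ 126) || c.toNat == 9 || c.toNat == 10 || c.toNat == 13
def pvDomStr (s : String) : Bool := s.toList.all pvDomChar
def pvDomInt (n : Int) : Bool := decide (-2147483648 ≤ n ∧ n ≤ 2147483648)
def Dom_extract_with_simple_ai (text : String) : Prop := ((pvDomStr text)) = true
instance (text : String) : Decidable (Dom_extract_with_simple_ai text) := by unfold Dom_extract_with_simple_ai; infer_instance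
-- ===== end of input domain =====

-- B fuses A's three sequential passes over the lines into one loop carrying flags; same return value
-- (objective: alternative decomposition, one pass). Under the fixed List (String × String) signature the
-- Python boolean value True is encoded as the string "True" identically in both ports.

-- shared literal constants of the Python source
def pvIndustryKeywords : List String := ["software", "technology", "web development", "mobile apps", "consulting"]
def pvDescWords : List String := ["we are", "we specialize", "our team"]

-- hand port of str.title(): exact on ASCII (where 'cased' = alphabetic); applied only to the lowercase ASCII keyword literals
def pvTitleGo : Bool → List Char → List Char
  | _, [] => []
  | prev, c :: rest =>
    (if PySem.Chars.isalpha c then (if prev then PySem.Chars.lowerChar c else PySem.Chars.upperChar c) else c)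
      :: pvTitleGo (PySem.Chars.isalpha c) rest

def pvTitle (s : String) : String := String.ofList (pvTitleGo false s.toList)

-- ===== PORT A =====
-- A's first loop: for line: for keyword: if keyword in line: set industry, break; then break
def pvIndustryLoop : List String → Option String
  | [] => none
  | l :: rest =>
    match (pvIndustryKeywords.find? (fun k => PySem.Str.isIn k l)).map pvTitle with
    | some t => some t
    | none => pvIndustryLoop rest

-- A's second loop: collect stripped lines containing a description word
def pvDescLoop : List String → List String
  | [] => []
  | l :: rest =>
    if pvDescWords.any (fun w => PySem.Str.isIn w l)
    then PySem.Str.strip l :: pvDescLoop rest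
    else pvDescLoop rest

-- A's third loop: break on the first line with 'contact' and '@'
def pvContactLoop : List String → Bool
  | [] => false
  | l :: rest =>
    if PySem.Str.isIn "contact" l && PySem.Str.isIn "@" l then true else pvContactLoop rest

def extract_with_simple_ai (text : String) : List (String × String) :=
  let lines := ((PySem.Str.split? (PySem.Str.lower text) "\n").getD [])
  let d0 : PySem.Dict String String := PySem.Dict.empty
  let d1 := match pvIndustryLoop lines with
    | some t => d0.insert "industry" t
    | none => d0
  let ds := pvDescLoop lines
  let d2 := if ds.isEmpty then d1 else d1.insert "description" (PySem.Str.join ". " ds)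
  let d3 := if pvContactLoop lines then d2.insert "has_contact_info" "True" else d2
  d3.items

-- ===== PORT B =====
-- B's single pass: state = (industry found so far, description lines so far, contact flag)
def pvStep (st : Option String × List String × Bool) (line : String) :
    Option String × List String × Bool :=
  let ind := match st.1 with
    | some t => some t
    | none => (pvIndustryKeywords.find? (fun k => PySem.Str.isIn k line)).map pvTitle
  let ds := if pvDescWords.any (fun w => PySem.Str.isIn w line)
            then st.2.1 ++ [PySem.Str.strip line] else st.2.1
  let c := st.2.2 || (PySem.Str.isIn "contact" line && PySem.Str.isIn "@" line)
  (ind, ds, c)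

def extract_with_simple_ai_alt (text : String) : List (String × String) :=
  let lines := ((PySem.Str.split? (PySem.Str.lower text) "\n").getD [])
  let st := lines.foldl pvStep (none, [], false)
  (match st.1 with | some t => [("industry", t)] | none => [])
    ++ (if st.2.1.isEmpty then [] else [("description", PySem.Str.join ". " st.2.1)])
    ++ (if st.2.2 then [("has_contact_info", "True")] else [])

-- ===== PRECONDITION & SPEC =====
def Spec_extract_with_simple_ai (text : String) (out : List (String × String)) : Prop := out = extract_with_simple_ai_alt text
instance (text : String) (out : List (String × String)) : Decidable (Spec_extract_with_simple_ai text out) := by unfold Spec_extract_with_simple_ai; infer_instance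

-- ===== CLAIM (what is proved, stated in full; the proofs are below) =====
def Claim_equal_extract_with_simple_ai : Prop := ∀ (text : String), Dom_extract_with_simple_ai text → Spec_extract_with_simple_ai text (extract_with_simple_ai text)

-- ===== LEMMAS AND PROOFS =====

theorem pvStep_fst (lines : List String) (io : Option String) (ds : List String) (b : Bool) :
    (lines.foldl pvStep (io, ds, b)).1
      = (match io with | some t => some t | none => pvIndustryLoop lines) := by
  induction lines generalizing io ds b with
  | nil => cases io <;> simp [pvIndustryLoop]
  | cons l rest ih =>
    cases io with
    | some t => simp [List.foldl_cons, pvStep, ih]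
    | none =>
      simp only [List.foldl_cons, pvStep, pvIndustryLoop]
      cases h : (pvIndustryKeywords.find? (fun k => PySem.Str.isIn k l)).map pvTitle with
      | some t => simp [h, ih]
      | none => simp [h, ih]

theorem pvStep_desc (lines : List String) (io : Option String) (ds : List String) (b : Bool) :
    (lines.foldl pvStep (io, ds, b)).2.1 = ds ++ pvDescLoop lines := by
  induction lines generalizing io ds b with
  | nil => simp [pvDescLoop]
  | cons l rest ih =>
    simp only [List.foldl_cons, pvStep]
    rw [ih]
    conv_rhs => rw [pvDescLoop]
    split_ifs <;> simp

theorem pvStep_contact (lines : List String) (io : Option String) (ds : List String) (b : Bool) :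
    (lines.foldl pvStep (io, ds, b)).2.2 = (b || pvContactLoop lines) := by
  induction lines generalizing io ds b with
  | nil => simp [pvContactLoop]
  | cons l rest ih =>
    simp only [List.foldl_cons, pvStep]
    rw [ih]
    conv_rhs => rw [pvContactLoop]
    cases hc : (PySem.Str.isIn "contact" l && PySem.Str.isIn "@" l) <;> simp

theorem ports_agree (text : String) :
    extract_with_simple_ai text = extract_with_simple_ai_alt text := by
  unfold extract_with_simple_ai extract_with_simple_ai_alt
  simp only [pvStep_fst, pvStep_desc, pvStep_contact, List.nil_append, Bool.false_or]
  cases pvIndustryLoop (((PySem.Str.split? (PySem.Str.lower text) "\n").getD [])) with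
  | some t =>
    cases h : pvDescLoop (((PySem.Str.split? (PySem.Str.lower text) "\n").getD [])) with
    | nil =>
      cases pvContactLoop (((PySem.Str.split? (PySem.Str.lower text) "\n").getD [])) <;>
        simp [h, PySem.Dict.insert, PySem.Dict.empty, PySem.Dict.items, PySem.Dict.contains]
    | cons x xs =>
      cases pvContactLoop (((PySem.Str.split? (PySem.Str.lower text) "\n").getD [])) <;>
        simp [h, PySem.Dict.insert, PySem.Dict.empty, PySem.Dict.items, PySem.Dict.contains]
  | none =>
    cases h : pvDescLoop (((PySem.Str.split? (PySem.Str.lower text) "\n").getD [])) with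
    | nil =>
      cases pvContactLoop (((PySem.Str.split? (PySem.Str.lower text) "\n").getD [])) <;>
        simp [h, PySem.Dict.insert, PySem.Dict.empty, PySem.Dict.items, PySem.Dict.contains]
    | cons x xs =>
      cases pvContactLoop (((PySem.Str.split? (PySem.Str.lower text) "\n").getD [])) <;>
        simp [h, PySem.Dict.insert, PySem.Dict.empty, PySem.Dict.items, PySem.Dict.contains]

-- ===== VERDICT (by name: the statement is the Claim_ definition above) =====
theorem extract_with_simple_ai_spec : Claim_equal_extract_with_simple_ai := by
  intro text _
  exact ports_agree text
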